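-- pv_equiv track=rewrite | github.com/KennyGlacier/Stagger | main.py | reposition
-- ===== SOURCE A (Python) =====
-- def reposition(data, scaling = 1):
--     '''Returns data, boundingBox'''
--     xMin = data[0][0]
--     yMin = data[0][1]
--     xMax = data[0][0]
--     yMax = data[0][1]
--
--     for i in range(len(data)):
--         if data[i][0] < xMin:
--             xMin = data[i][0]
--         if data[i][1] < yMin:
--             yMin = data[i][1]
--         if data[i][0] > xMax:
--             xMax = data[i][0]
--         if data[i][1] > yMax:
--             yMax = data[i][1]
--
--     repoData = []
--
--     for i in range(len(data)):
--         repoData.append(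
--             (int((data[i][0] - xMin) * scaling),
--             (int((data[i][1] - yMin) * scaling) )))
--
--     return repoData, (int((xMax - xMin) * scaling), int((yMax - yMin) * scaling))
-- ===== SOURCE B (Python) =====
-- def reposition(data, scaling = 1):
--     '''Returns data, boundingBox'''
--     xs = sorted(p[0] for p in data)
--     ys = sorted(p[1] for p in data)
--     xMin, xMax = xs[0], xs[-1]
--     yMin, yMax = ys[0], ys[-1]
--     repoData = [(int((x - xMin) * scaling), int((y - yMin) * scaling)) for x, y in data]
--     return repoData, (int((xMax - xMin) * scaling), int((yMax - yMin) * scaling))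
-- ===== Notes on version B (the rewrite author's own statement) =====
-- stated objective: alternative
-- what changed: Replaced A's four-accumulator scanning loop with sorting each coordinate column and reading the extremes off the sorted lists' ends, plus a list comprehension for the repositioned points.
import Mathlib
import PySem

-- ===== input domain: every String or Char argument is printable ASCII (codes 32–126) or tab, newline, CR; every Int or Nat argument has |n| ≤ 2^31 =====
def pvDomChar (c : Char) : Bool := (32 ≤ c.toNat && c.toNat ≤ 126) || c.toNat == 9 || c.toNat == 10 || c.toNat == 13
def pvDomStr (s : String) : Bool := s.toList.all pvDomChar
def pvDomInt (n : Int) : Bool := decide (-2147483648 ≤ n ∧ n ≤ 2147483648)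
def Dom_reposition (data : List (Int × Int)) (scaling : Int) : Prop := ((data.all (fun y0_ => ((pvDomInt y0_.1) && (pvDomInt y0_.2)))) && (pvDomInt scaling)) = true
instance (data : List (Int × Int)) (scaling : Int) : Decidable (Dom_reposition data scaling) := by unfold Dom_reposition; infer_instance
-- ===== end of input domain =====

-- B replaces A's four-accumulator scanning loop with sorting each coordinate column and reading the extremes off the sorted lists' ends (alternative decomposition; return value only).


-- ===== PORT A =====
-- A's loop body: four independent comparisons updating (xMin, yMin, xMax, yMax)
def repoStep (s : Int × Int × Int × Int) (q : Int × Int) : Int × Int × Int × Int :=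
  let xMin := if q.1 < s.1 then q.1 else s.1
  let yMin := if q.2 < s.2.1 then q.2 else s.2.1
  let xMax := if q.1 > s.2.2.1 then q.1 else s.2.2.1
  let yMax := if q.2 > s.2.2.2 then q.2 else s.2.2.2
  (xMin, yMin, xMax, yMax)

def reposition (data : List (Int × Int)) (scaling : Int) : (List (Int × Int)) × (Int × Int) :=
  match data with
  | [] => ([], (0, 0))      -- Python raises IndexError here; excluded by Pre_
  | p :: _ =>
    -- for i in range(len(data)): four if-updates (initial values = data[0])
    let st := data.foldl repoStep (p.1, p.2, p.1, p.2)
    -- repoData built by append; int() is identity on ints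
    let repo := data.foldl
      (fun acc q => acc ++ [((q.1 - st.1) * scaling, (q.2 - st.2.1) * scaling)])
      ([] : List (Int × Int))
    (repo, ((st.2.2.1 - st.1) * scaling, (st.2.2.2 - st.2.1) * scaling))

-- ===== PORT B =====
-- sorted(...) = PySem.List.sorted; xs[0]/xs[-1] read off the matched nonempty sorted list
-- (head and getLastD on the matched cons cell are exactly Python's xs[0] and xs[-1] there).
def reposition_alt (data : List (Int × Int)) (scaling : Int) : (List (Int × Int)) × (Int × Int) :=
  let xs := PySem.List.sorted (data.map Prod.fst) (fun x => x) false
  let ys := PySem.List.sorted (data.map Prod.snd) (fun x => x) false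
  match xs, ys with
  | x0 :: xt, y0 :: yt =>
    let xMin := x0
    let xMax := (x0 :: xt).getLastD x0
    let yMin := y0
    let yMax := (y0 :: yt).getLastD y0
    (data.map (fun q => ((q.1 - xMin) * scaling, (q.2 - yMin) * scaling)),
     ((xMax - xMin) * scaling, (yMax - yMin) * scaling))
  | _, _ => ([], (0, 0))   -- empty data: Python's xs[0] raises IndexError; excluded by Pre_

-- ===== PRECONDITION & SPEC =====
-- Pre_ excludes only the empty list, on which both A and B raise IndexError.
def Pre_reposition (data : List (Int × Int)) (scaling : Int) : Prop := data ≠ []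
instance (data : List (Int × Int)) (scaling : Int) : Decidable (Pre_reposition data scaling) := by unfold Pre_reposition; infer_instance
def pvWitness_reposition : (List (Int × Int)) × Int := ([(3, -2), (0, 5)], 2)

def Spec_reposition (data : List (Int × Int)) (scaling : Int) (out : (List (Int × Int)) × (Int × Int)) : Prop := out = reposition_alt data scaling
instance (data : List (Int × Int)) (scaling : Int) (out : (List (Int × Int)) × (Int × Int)) : Decidable (Spec_reposition data scaling out) := by unfold Spec_reposition; infer_instance

-- ===== CLAIM =====
def Claim_equal_reposition : Prop := ∀ (data : List (Int × Int)) (scaling : Int), Dom_reposition data scaling → Pre_reposition data scaling → Spec_reposition data scaling (reposition data scaling)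

-- ===== LEMMAS AND PROOFS =====
-- A's fold tracks exactly the column-wise min/min/max/max folds.
theorem repoStep_fold (l : List (Int × Int)) (a b c d : Int) :
    l.foldl repoStep (a, b, c, d) =
      ((l.map Prod.fst).foldl min a, (l.map Prod.snd).foldl min b,
       (l.map Prod.fst).foldl max c, (l.map Prod.snd).foldl max d) := by
  induction l generalizing a b c d with
  | nil => rfl
  | cons q t ih =>
    have hstep : repoStep (a, b, c, d) q = (min a q.1, min b q.2, max c q.1, max d q.2) := by
      simp only [repoStep, min_def, max_def, Prod.mk.injEq]
      refine ⟨?_, ?_, ?_, ?_⟩ <;> split_ifs <;> omega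
    simp only [List.foldl_cons, hstep, ih, List.map_cons]

theorem foldl_append_map {α β : Type} (f : α → β) (l : List α) (acc : List β) :
    l.foldl (fun acc q => acc ++ [f q]) acc = acc ++ l.map f := by
  induction l generalizing acc with
  | nil => simp
  | cons q t ih => simp [List.foldl, ih]

-- foldl min/max: lower/upper bound and membership
theorem foldl_min_le (l : List Int) (a : Int) :
    l.foldl min a ≤ a ∧ ∀ y ∈ l, l.foldl min a ≤ y := by
  induction l generalizing a with
  | nil => simp
  | cons x t ih =>
    have h := ih (min a x)
    refine ⟨le_trans h.1 (min_le_left _ _), ?_⟩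
    intro y hy
    rcases hy with _ | hy
    · exact le_trans h.1 (min_le_right _ _)
    · exact h.2 y (by assumption)

theorem foldl_min_mem (l : List Int) (a : Int) :
    l.foldl min a = a ∨ l.foldl min a ∈ l := by
  induction l generalizing a with
  | nil => simp
  | cons x t ih =>
    rcases ih (min a x) with h | h
    · rcases min_cases a x with ⟨he, _⟩ | ⟨he, _⟩
      · left; rw [List.foldl_cons, h, he]
      · right; rw [List.foldl_cons, h, he]; exact List.mem_cons_self
    · right; exact List.mem_cons_of_mem _ h

theorem foldl_max_ge (l : List Int) (a : Int) :
    a ≤ l.foldl max a ∧ ∀ y ∈ l, y ≤ l.foldl max a := by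
  induction l generalizing a with
  | nil => simp
  | cons x t ih =>
    have h := ih (max a x)
    refine ⟨le_trans (le_max_left _ _) h.1, ?_⟩
    intro y hy
    rcases hy with _ | hy
    · exact le_trans (le_max_right _ _) h.1
    · exact h.2 y (by assumption)

theorem foldl_max_mem (l : List Int) (a : Int) :
    l.foldl max a = a ∨ l.foldl max a ∈ l := by
  induction l generalizing a with
  | nil => simp
  | cons x t ih =>
    rcases ih (max a x) with h | h
    · rcases max_cases a x with ⟨he, _⟩ | ⟨he, _⟩
      · left; rw [List.foldl_cons, h, he]
      · right; rw [List.foldl_cons, h, he]; exact List.mem_cons_self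
    · right; exact List.mem_cons_of_mem _ h

theorem getLastD_mem {α : Type} (x : α) (xs : List α) (d : α) :
    (x :: xs).getLastD d ∈ x :: xs := by
  induction xs generalizing x with
  | nil => simp
  | cons y t ih => exact List.mem_cons_of_mem _ (ih y)

theorem le_getLastD (x : Int) (xs : List Int) (d : Int)
    (hp : (x :: xs).Pairwise (· ≤ ·)) : ∀ y ∈ x :: xs, y ≤ (x :: xs).getLastD d := by
  induction xs generalizing x with
  | nil => simp
  | cons z t ih =>
    intro y hy
    have hp' := (List.pairwise_cons.mp hp)
    rcases hy with _ | hy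
    · exact le_trans (hp'.1 z (List.mem_cons_self)) (ih z hp'.2 z List.mem_cons_self)
    · exact ih z hp'.2 y (by assumption)

-- the sorted list's head is A's running min, its last element A's running max
theorem min_eq_sorted_head (l : List Int) (a : Int) (ha : a ∈ l) (x0 : Int) (xt : List Int)
    (hs : PySem.List.sorted l (fun x => x) false = x0 :: xt) :
    l.foldl min a = x0 := by
  have hmem : l.foldl min a ∈ l := by
    rcases foldl_min_mem l a with h | h
    · rw [h]; exact ha
    · exact h
  have hx0mem : x0 ∈ l := by
    have : x0 ∈ PySem.List.sorted l (fun x => x) false := by rw [hs]; exact List.mem_cons_self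
    exact (PySem.List.mem_sorted _ _ _ _).mp this
  have h1 : l.foldl min a ≤ x0 := (foldl_min_le l a).2 x0 hx0mem
  have h2 : x0 ≤ l.foldl min a := PySem.List.key_head_sorted_le _ _ hs _ hmem
  omega

theorem max_eq_sorted_last (l : List Int) (a : Int) (ha : a ∈ l) (x0 : Int) (xt : List Int)
    (hs : PySem.List.sorted l (fun x => x) false = x0 :: xt) :
    l.foldl max a = (x0 :: xt).getLastD x0 := by
  have hmem : l.foldl max a ∈ l := by
    rcases foldl_max_mem l a with h | h
    · rw [h]; exact ha
    · exact h
  have hlmem : (x0 :: xt).getLastD x0 ∈ l := by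
    have : (x0 :: xt).getLastD x0 ∈ PySem.List.sorted l (fun x => x) false := by
      rw [hs]; exact getLastD_mem _ _ _
    exact (PySem.List.mem_sorted _ _ _ _).mp this
  have hp : (x0 :: xt).Pairwise (· ≤ ·) := by
    have := PySem.List.sorted_pairwise (xs := l) (key := fun x => x)
    rw [hs] at this; exact this
  have hmem' : l.foldl max a ∈ x0 :: xt := by
    rw [← hs]; exact (PySem.List.mem_sorted _ _ _ _).mpr hmem
  have h1 : l.foldl max a ≤ (x0 :: xt).getLastD x0 := le_getLastD x0 xt x0 hp _ hmem'
  have h2 : (x0 :: xt).getLastD x0 ≤ l.foldl max a := (foldl_max_ge l a).2 _ hlmem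
  omega

-- ===== VERDICT =====
theorem reposition_spec : Claim_equal_reposition := by
  intro data scaling _ hpre
  unfold Spec_reposition
  match data with
  | [] => exact absurd rfl hpre
  | p :: t =>
    obtain ⟨x0, xt, hxs⟩ : ∃ x0 xt,
        PySem.List.sorted ((p :: t).map Prod.fst) (fun x => x) false = x0 :: xt := by
      rcases h : PySem.List.sorted ((p :: t).map Prod.fst) (fun x => x) false with _ | ⟨x0, xt⟩
      · exact absurd ((PySem.List.sorted_eq_nil_iff _ _ _).mp h) (by simp)
      · exact ⟨x0, xt, rfl⟩
    obtain ⟨y0, yt, hys⟩ : ∃ y0 yt,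
        PySem.List.sorted ((p :: t).map Prod.snd) (fun x => x) false = y0 :: yt := by
      rcases h : PySem.List.sorted ((p :: t).map Prod.snd) (fun x => x) false with _ | ⟨y0, yt⟩
      · exact absurd ((PySem.List.sorted_eq_nil_iff _ _ _).mp h) (by simp)
      · exact ⟨y0, yt, rfl⟩
    have hpx : p.1 ∈ (p :: t).map Prod.fst := by simp
    have hpy : p.2 ∈ (p :: t).map Prod.snd := by simp
    have hxmin := min_eq_sorted_head _ p.1 hpx x0 xt hxs
    have hymin := min_eq_sorted_head _ p.2 hpy y0 yt hys
    have hxmax := max_eq_sorted_last _ p.1 hpx x0 xt hxs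
    have hymax := max_eq_sorted_last _ p.2 hpy y0 yt hys
    simp only [reposition, reposition_alt, foldl_append_map, repoStep_fold, hxs, hys,
      hxmin, hymin, hxmax, hymax, List.nil_append]
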